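-- pv_equiv track=rewrite | github.com/mrisney/simple-ocr | api/insuranceCardExtractAPI.py | extract_answers_to_json
-- ===== SOURCE A (Python) =====
-- def extract_answers_to_json(answer_str, questions, key_phrases):
--     sentences = [s.strip() for s in answer_str.split('.')]
--     qa_pairs = {}
--     for question, key_phrase in key_phrases.items():
--         for sentence in sentences:
--             if sentence.startswith(key_phrase):
--                 answer = sentence
--                 qa_pairs[question] = answer
--                 break
--     return qa_pairs
-- ===== SOURCE B (Python) =====
-- def extract_answers_to_json(answer_str, questions, key_phrases):
--     sentences = [s.strip() for s in answer_str.split('.')]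
--     matched = {}
--     for sentence in sentences:
--         for phrase in key_phrases.values():
--             if phrase not in matched and sentence.startswith(phrase):
--                 matched[phrase] = sentence
--     return {q: matched[p] for q, p in key_phrases.items() if p in matched}
-- ===== Notes on version B (the rewrite author's own statement) =====
-- stated objective: alternative
-- what changed: Inverted the loop nesting: instead of scanning all sentences afresh for each key phrase, B makes one forward pass over the sentences filling a phrase->sentence map (first match wins), then projects it through key_phrases to build the answer dict.
import Mathlib
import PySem

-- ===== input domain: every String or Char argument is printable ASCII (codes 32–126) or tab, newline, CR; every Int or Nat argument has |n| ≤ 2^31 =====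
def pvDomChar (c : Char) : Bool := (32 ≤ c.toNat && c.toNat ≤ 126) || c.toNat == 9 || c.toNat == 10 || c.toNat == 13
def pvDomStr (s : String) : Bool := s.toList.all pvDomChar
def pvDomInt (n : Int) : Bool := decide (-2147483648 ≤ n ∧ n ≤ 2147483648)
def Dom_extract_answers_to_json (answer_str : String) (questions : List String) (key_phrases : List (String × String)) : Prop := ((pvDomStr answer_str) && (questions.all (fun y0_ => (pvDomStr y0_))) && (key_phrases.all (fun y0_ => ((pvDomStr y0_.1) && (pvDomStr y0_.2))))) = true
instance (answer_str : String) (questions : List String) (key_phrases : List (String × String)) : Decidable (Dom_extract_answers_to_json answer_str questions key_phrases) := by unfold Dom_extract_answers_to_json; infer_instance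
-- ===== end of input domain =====

-- B inverts the loop nesting of A: one forward pass over the sentences fills a phrase→sentence map, then key_phrases is projected through it; same results, no speed claim.

-- ===== PORT A =====
-- for question, key_phrase in key_phrases.items(): for sentence: if startswith: insert; break
def extract_answers_to_json (answer_str : String) (questions : List String) (key_phrases : List (String × String)) : List (String × String) :=
  let sentences := ((PySem.Str.split? answer_str ".").getD []).map PySem.Str.strip
  let qa_pairs := (PySem.Dict.ofList key_phrases).items.foldl
    (fun (d : PySem.Dict String String) qp =>
      -- inner 'for sentence … break' = first sentence that startswith
      match sentences.find? (fun s => PySem.Str.startswith s qp.2) with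
      | some answer => d.insert qp.1 answer
      | none => d)
    PySem.Dict.empty
  qa_pairs.items

-- ===== PORT B =====
def extract_answers_to_json_alt (answer_str : String) (questions : List String) (key_phrases : List (String × String)) : List (String × String) :=
  let sentences := ((PySem.Str.split? answer_str ".").getD []).map PySem.Str.strip
  let kp := PySem.Dict.ofList key_phrases
  let matched := sentences.foldl
    (fun (m : PySem.Dict String String) sentence =>
      kp.values.foldl
        (fun (m : PySem.Dict String String) phrase =>
          if (m.get? phrase).isNone && PySem.Str.startswith sentence phrase then m.insert phrase sentence else m)
        m)
    PySem.Dict.empty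
  kp.items.filterMap (fun qp => (matched.get? qp.2).map (fun s => (qp.1, s)))

-- ===== PRECONDITION & SPEC =====
def Spec_extract_answers_to_json (answer_str : String) (questions : List String) (key_phrases : List (String × String)) (out : List (String × String)) : Prop := out = extract_answers_to_json_alt answer_str questions key_phrases
instance (answer_str : String) (questions : List String) (key_phrases : List (String × String)) (out : List (String × String)) : Decidable (Spec_extract_answers_to_json answer_str questions key_phrases out) := by unfold Spec_extract_answers_to_json; infer_instance

-- ===== CLAIM (what is proved, stated in full; the proofs are below) =====
def Claim_equal_extract_answers_to_json : Prop := ∀ (answer_str : String) (questions : List String) (key_phrases : List (String × String)), Dom_extract_answers_to_json answer_str questions key_phrases → Spec_extract_answers_to_json answer_str questions key_phrases (extract_answers_to_json answer_str questions key_phrases)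

-- ===== LEMMAS AND PROOFS =====

-- B's inner fold over the phrases, one sentence: effect on a lookup at p
theorem pv_inner_get (s : String) (ps : List String) (m : PySem.Dict String String) (p : String) :
    ((ps.foldl (fun (m : PySem.Dict String String) phrase =>
        if (m.get? phrase).isNone && PySem.Str.startswith s phrase then m.insert phrase s else m) m).get? p)
    = if p ∈ ps ∧ m.get? p = none ∧ PySem.Str.startswith s p = true then some s else m.get? p := by
  induction ps generalizing m with
  | nil => simp
  | cons q ps ih =>
    simp only [List.foldl_cons]
    rw [ih]
    have hstep : ((if (m.get? q).isNone && PySem.Str.startswith s q then m.insert q s else m).get? p)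
        = if p = q ∧ m.get? q = none ∧ PySem.Str.startswith s q = true then some s else m.get? p := by
      by_cases hc : ((m.get? q).isNone && PySem.Str.startswith s q) = true
      · rw [if_pos hc, PySem.Dict.get?_insert]
        simp only [Bool.and_eq_true, Option.isNone_iff_eq_none] at hc
        by_cases hpq : p = q
        · rw [if_pos hpq, if_pos ⟨hpq, hc.1, hc.2⟩]
        · rw [if_neg hpq, if_neg (fun h => hpq h.1)]
      · rw [if_neg hc]
        simp only [Bool.and_eq_true, Option.isNone_iff_eq_none] at hc
        rw [if_neg]
        rintro ⟨hpq, h1, h2⟩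
        subst hpq
        exact hc ⟨h1, h2⟩
    rw [hstep]
    simp only [List.mem_cons]
    by_cases hC : p = q ∧ m.get? q = none ∧ PySem.Str.startswith s q = true
    · obtain ⟨hpq, hmq, hsw⟩ := hC
      subst hpq
      simp [hmq]
    · simp only [if_neg hC]
      by_cases h1 : p ∈ ps ∧ m.get? p = none ∧ PySem.Str.startswith s p = true
      · rw [if_pos h1, if_pos ⟨Or.inr h1.1, h1.2⟩]
      · rw [if_neg h1, if_neg]
        rintro ⟨hq | hps, hrest⟩
        · subst hq
          exact hC ⟨rfl, hrest⟩
        · exact h1 ⟨hps, hrest⟩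

-- B's outer fold over the sentences: a lookup at p ∈ vs is first-match find?
theorem pv_outer_get (vs : List String) (ss : List String) (m : PySem.Dict String String) (p : String)
    (hp : p ∈ vs) :
    ((ss.foldl (fun (m : PySem.Dict String String) sentence =>
        vs.foldl (fun (m : PySem.Dict String String) phrase =>
          if (m.get? phrase).isNone && PySem.Str.startswith sentence phrase then m.insert phrase sentence else m) m) m).get? p)
    = (m.get? p).or (ss.find? (fun s => PySem.Str.startswith s p)) := by
  induction ss generalizing m with
  | nil => simp
  | cons s ss ih =>
    simp only [List.foldl_cons]
    rw [ih, pv_inner_get]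
    cases hm : m.get? p with
    | some v => simp
    | none =>
      by_cases hsw : PySem.Chars.startswith s.toList p.toList = true
      · simp [hp, hsw]
      · simp [hsw]

-- A's fold over fresh distinct keys: the items append its filterMap
theorem pv_a_fold (f : String × String → Option String) (l : List (String × String))
    (d : PySem.Dict String String)
    (hnd : (l.map Prod.fst).Nodup) (hfresh : ∀ qp ∈ l, d.contains qp.1 = false) :
    (l.foldl (fun (d : PySem.Dict String String) qp =>
        match f qp with
        | some answer => d.insert qp.1 answer
        | none => d) d).items
    = d.items ++ l.filterMap (fun qp => (f qp).map (fun s => (qp.1, s))) := by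
  induction l generalizing d with
  | nil => simp
  | cons qp l ih =>
    simp only [List.foldl_cons, List.filterMap_cons, List.map_cons, List.nodup_cons] at *
    have hfr : d.contains qp.1 = false := hfresh qp (List.mem_cons_self)
    cases hf : f qp with
    | none =>
      simp only [Option.map_none]
      rw [ih _ hnd.2 (fun r hr => hfresh r (List.mem_cons_of_mem _ hr))]
    | some s =>
      simp only [Option.map_some]
      rw [ih _ hnd.2 ?_]
      · rw [PySem.Dict.items_insert_of_not_contains _ _ hfr, List.append_assoc]
        rfl
      · intro r hr
        rw [PySem.Dict.contains_insert]
        have hne : r.1 ≠ qp.1 := by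
          intro h
          exact hnd.1 (h ▸ List.mem_map_of_mem hr)
        simp [hne, hfresh r (List.mem_cons_of_mem _ hr)]

-- ===== VERDICT (by name: the statement is the Claim_ definition above) =====
theorem extract_answers_to_json_spec : Claim_equal_extract_answers_to_json := by
  intro answer_str questions key_phrases _
  show extract_answers_to_json _ _ _ = extract_answers_to_json_alt _ _ _
  unfold extract_answers_to_json extract_answers_to_json_alt
  dsimp only
  rw [pv_a_fold (f := fun qp =>
        (((PySem.Str.split? answer_str ".").getD []).map PySem.Str.strip).find?
          (fun s => PySem.Str.startswith s qp.2))
      (PySem.Dict.ofList key_phrases).items PySem.Dict.empty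
      (by simpa [PySem.Dict.keys] using PySem.Dict.nodup_keys_ofList key_phrases)
      (fun qp _ => PySem.Dict.contains_empty _)]
  rw [show (PySem.Dict.empty : PySem.Dict String String).items = [] from rfl, List.nil_append]
  apply List.filterMap_congr
  intro qp hqp
  rw [pv_outer_get ((PySem.Dict.ofList key_phrases).values) _ _ _
        (show qp.2 ∈ (PySem.Dict.ofList key_phrases).values from List.mem_map_of_mem (f := Prod.snd) hqp)]
  simp
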